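-- pv_equiv track=rewrite | github.com/NguyenMaiChiTan/SE355_ML-and-Application | 21521414/167_Python_Homework/bai_67.py | findOddNumber
-- ===== SOURCE A (Python) =====
-- def findOddNumber(n):
--     existOddNumber = False
--     if n > 0:
--         tempOfn = n;
--         while (tempOfn != 0):
--             temp = tempOfn % 10
--             if (temp % 2) != 0:
--                 existOddNumber = True
--             tempOfn //= 10
--     return existOddNumber
-- ===== SOURCE B (Python) =====
-- def findOddNumber(n):
--     return n > 0 and any(int(c) % 2 == 1 for c in str(n))
-- ===== Notes on version B (the rewrite author's own statement) =====
-- stated objective: idiomatic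
-- what changed: Replaces the modulus/floor-division digit-peeling while-loop with an accumulator flag by a short-circuiting any() over the characters of the decimal string representation.
import Mathlib
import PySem

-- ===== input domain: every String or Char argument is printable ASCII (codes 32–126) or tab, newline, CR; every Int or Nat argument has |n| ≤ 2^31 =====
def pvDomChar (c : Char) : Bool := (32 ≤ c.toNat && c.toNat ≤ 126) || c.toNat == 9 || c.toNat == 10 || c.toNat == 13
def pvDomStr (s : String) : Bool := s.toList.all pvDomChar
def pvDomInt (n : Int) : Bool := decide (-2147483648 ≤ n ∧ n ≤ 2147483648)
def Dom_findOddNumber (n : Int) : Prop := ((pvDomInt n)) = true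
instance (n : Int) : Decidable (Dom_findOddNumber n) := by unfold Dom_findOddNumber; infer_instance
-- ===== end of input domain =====

-- B replaces A's arithmetic digit-peeling loop by an any() scan over the decimal string (idiomatic; same cost).

-- ===== PORT A =====
-- A's while-loop runs only when n > 0, so it operates on a nonnegative value throughout;
-- on nonnegative ints Python's % 10 and // 10 coincide with Nat's % and /, so the loop is
-- transcribed as structural recursion on a Nat carrying the same accumulator flag.
def faLoop (t : Nat) (acc : Bool) : Bool :=
  if t ≠ 0 then
    faLoop (t / 10) (if (t % 10) % 2 ≠ 0 then true else acc)
  else acc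
  termination_by t
  decreasing_by exact Nat.div_lt_self (by omega) (by omega)

def findOddNumber (n : Int) : Bool :=
  if n > 0 then faLoop n.toNat false else false

-- ===== PORT B =====
-- int(c) for a single character is exactly PySem.Int.ofChars? [c] (ValueError never occurs:
-- every character of str(n) for n > 0 is a decimal digit, so getD 0 is never reached).
def fbOddChar (c : Char) : Bool :=
  PySem.Int.mod ((PySem.Int.ofChars? [c]).getD 0) 2 == 1

def findOddNumber_alt (n : Int) : Bool :=
  decide (n > 0) && (PySem.Int.toChars n).any fbOddChar

-- ===== PRECONDITION & SPEC =====
def Spec_findOddNumber (n : Int) (out : Bool) : Prop := out = findOddNumber_alt n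
instance (n : Int) (out : Bool) : Decidable (Spec_findOddNumber n out) := by unfold Spec_findOddNumber; infer_instance

-- ===== CLAIM (what is proved, stated in full; the proofs are below) =====
def Claim_equal_findOddNumber : Prop := ∀ (n : Int), Dom_findOddNumber n → Spec_findOddNumber n (findOddNumber n)

-- ===== LEMMAS AND PROOFS =====

-- "some digit of m (including a last digit 0) is odd", shaped like the digit lists both ports scan
def digAny (m : Nat) : Bool :=
  decide ((m % 10) % 2 = 1) || (if h : m / 10 = 0 then false else digAny (m / 10))
  termination_by m
  decreasing_by exact Nat.div_lt_self (by omega) (by omega)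

theorem faLoop_eq (t : Nat) (ht : t ≠ 0) : ∀ acc, faLoop t acc = (acc || digAny t) := by
  induction t using Nat.strong_induction_on with
  | _ t ih =>
    intro acc
    rw [faLoop, digAny]
    rw [if_pos ht]
    by_cases h10 : t / 10 = 0
    · rw [h10, faLoop]
      cases acc <;> simp [Nat.mod_two_ne_zero, Bool.or_comm]
    · rw [ih (t / 10) (Nat.div_lt_self (by omega) (by omega)) h10]
      simp only [h10, dif_neg, not_false_eq_true]
      cases acc <;> simp [Nat.mod_two_ne_zero, Bool.or_comm, Bool.or_assoc, Bool.or_left_comm]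

theorem fbOddChar_digitChar (d : Nat) (hd : d < 10) :
    fbOddChar (Nat.digitChar d) = decide (d % 2 = 1) := by
  interval_cases d <;> decide

theorem toDigitsCore_any (f : Nat) : ∀ (m : Nat) (ds : List Char), m < f →
    (Nat.toDigitsCore 10 f m ds).any fbOddChar = (digAny m || ds.any fbOddChar) := by
  induction f with
  | zero => intro m ds h; omega
  | succ f ih =>
    intro m ds h
    rw [Nat.toDigitsCore, digAny]
    by_cases h10 : m / 10 = 0
    · simp [h10, fbOddChar_digitChar (m % 10) (Nat.mod_lt _ (by omega))]
    · rw [if_neg h10, ih (m / 10) _ (by have := Nat.div_lt_self (by omega : 0 < m) (by omega : 1 < 10); omega)]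
      simp [h10, fbOddChar_digitChar (m % 10) (Nat.mod_lt _ (by omega)), Bool.or_assoc, Bool.or_left_comm]

-- ===== VERDICT (by name: the statement is the Claim_ definition above) =====
theorem findOddNumber_spec : Claim_equal_findOddNumber := by
  intro n _
  unfold Spec_findOddNumber findOddNumber findOddNumber_alt
  by_cases hn : n > 0
  · have h0 : ¬ n < 0 := by omega
    have hne : n.toNat ≠ 0 := by omega
    rw [if_pos hn, faLoop_eq n.toNat hne false]
    simp only [PySem.Int.toChars, if_neg h0, Nat.toDigits]
    rw [toDigitsCore_any (n.toNat + 1) n.toNat [] (by omega)]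
    simp [hn]
  · simp [hn]
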